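-- pv_equiv track=rewrite | github.com/kalviumcommunity/Dream-Composer | prompt_structure/emotion_extractor.py | _determine_overall_mood
-- ===== SOURCE A (Python) =====
-- from typing import Dict, List, Optional, Tuple, Any
--
-- def _determine_overall_mood(emotions: List[str]) -> str:
--     """Determine overall mood from list of emotions."""
--     if not emotions:
--         return "neutral"
--
--     # Mood priority mapping
--     mood_priorities = {
--         "euphoric": ["joy", "excitement", "love"],
--         "peaceful": ["peace", "calm"],
--         "melancholic": ["sadness", "nostalgia"],
--         "anxious": ["fear", "anxiety"],
--         "energetic": ["excitement", "freedom"],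
--         "contemplative": ["wonder", "curiosity"]
--     }
--
--     for mood, mood_emotions in mood_priorities.items():
--         if any(emotion in emotions for emotion in mood_emotions):
--             return mood
--
--     return "contemplative"
-- ===== SOURCE B (Python) =====
-- from typing import List
--
-- # Reverse index: emotion -> index of the first (highest-priority) mood listing it.
-- _RANK = {
--     "joy": 0, "excitement": 0, "love": 0,
--     "peace": 1, "calm": 1,
--     "sadness": 2, "nostalgia": 2,
--     "fear": 3, "anxiety": 3,
--     "freedom": 4,
--     "wonder": 5, "curiosity": 5,
-- }
-- _MOODS = ["euphoric", "peaceful", "melancholic", "anxious", "energetic", "contemplative"]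
--
-- def _determine_overall_mood(emotions: List[str]) -> str:
--     """Determine overall mood from list of emotions."""
--     if not emotions:
--         return "neutral"
--     # Unknown emotions rank 5, which is "contemplative" -- the fallback mood.
--     return _MOODS[min(_RANK.get(e, 5) for e in emotions)]
-- ===== Notes on version B (the rewrite author's own statement) =====
-- stated objective: faster
-- what changed: Replaces the scan over the mood table with nested membership tests by a precomputed emotion-to-rank reverse index: one pass over the input taking the minimum rank (unknown emotions rank as the fallback mood), then a single indexed lookup.
import Mathlib
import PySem

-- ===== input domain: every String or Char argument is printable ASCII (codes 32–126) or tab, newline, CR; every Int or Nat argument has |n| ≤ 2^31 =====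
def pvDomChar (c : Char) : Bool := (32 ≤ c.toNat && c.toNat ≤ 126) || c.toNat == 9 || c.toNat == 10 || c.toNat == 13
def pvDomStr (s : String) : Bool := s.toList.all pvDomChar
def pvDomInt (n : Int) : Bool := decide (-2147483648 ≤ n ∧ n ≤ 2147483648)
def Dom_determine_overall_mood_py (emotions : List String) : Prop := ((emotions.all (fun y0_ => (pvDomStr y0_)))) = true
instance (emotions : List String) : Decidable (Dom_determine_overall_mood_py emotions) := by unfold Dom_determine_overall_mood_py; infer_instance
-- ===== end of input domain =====

set_option maxHeartbeats 1600000

-- B replaces A's scan over the mood table (membership test per mood) by a precomputed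
-- emotion→rank reverse index and a single min pass over the input: simpler, one pass.


-- ===== PORT A =====
-- A's mood_priorities dict, in insertion order
def pvMoodTable : List (String × List String) :=
  [("euphoric", ["joy", "excitement", "love"]),
   ("peaceful", ["peace", "calm"]),
   ("melancholic", ["sadness", "nostalgia"]),
   ("anxious", ["fear", "anxiety"]),
   ("energetic", ["excitement", "freedom"]),
   ("contemplative", ["wonder", "curiosity"])]

-- the 'for mood, mood_emotions in mood_priorities.items(): if any(...): return mood' loop
def pvALoop (emotions : List String) : List (String × List String) → String
  | [] => "contemplative"
  | (mood, moodEmotions) :: rest =>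
    if moodEmotions.any (fun emotion => emotions.contains emotion) then mood
    else pvALoop emotions rest

def determine_overall_mood_py (emotions : List String) : String :=
  if emotions = [] then "neutral"
  else pvALoop emotions pvMoodTable

-- ===== PORT B =====
def pvRank : PySem.Dict String Int :=
  PySem.Dict.ofList
    [("joy", 0), ("excitement", 0), ("love", 0),
     ("peace", 1), ("calm", 1),
     ("sadness", 2), ("nostalgia", 2),
     ("fear", 3), ("anxiety", 3),
     ("freedom", 4),
     ("wonder", 5), ("curiosity", 5)]

def pvMoods : List String :=
  ["euphoric", "peaceful", "melancholic", "anxious", "energetic", "contemplative"]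

def determine_overall_mood_py_alt (emotions : List String) : String :=
  if emotions = [] then "neutral"
  else
    -- min(_RANK.get(e, 5) for e in emotions); the generator is nonempty here, so min? is some
    match PySem.List.min? (emotions.map (fun e => pvRank.getD e 5)) (fun x => x) with
    | some m => PySem.List.pyGetD pvMoods m ""   -- index is always 0..5, in range
    | none => ""                                  -- unreachable: emotions ≠ []

-- ===== PRECONDITION & SPEC =====
def Spec_determine_overall_mood_py (emotions : List String) (out : String) : Prop := out = determine_overall_mood_py_alt emotions
instance (emotions : List String) (out : String) : Decidable (Spec_determine_overall_mood_py emotions out) := by unfold Spec_determine_overall_mood_py; infer_instance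

-- ===== CLAIM (what is proved, stated in full; the proofs are below) =====
def Claim_equal_determine_overall_mood_py : Prop := ∀ (emotions : List String), Dom_determine_overall_mood_py emotions → Spec_determine_overall_mood_py emotions (determine_overall_mood_py emotions)

-- ===== LEMMAS AND PROOFS =====

-- rank of an emotion: B's lookup with default 5
def pvRk (e : String) : Int := pvRank.getD e 5

-- minimum rank over a list of emotions (5 for the empty list)
def pvChain : List String → Int
  | [] => 5
  | e :: rest => min (pvRk e) (pvChain rest)

-- A's if-chain expressed on the input's membership booleans
def pvIdx (xs : List String) : Int :=
  if xs.contains "joy" || xs.contains "excitement" || xs.contains "love" then 0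
  else if xs.contains "peace" || xs.contains "calm" then 1
  else if xs.contains "sadness" || xs.contains "nostalgia" then 2
  else if xs.contains "fear" || xs.contains "anxiety" then 3
  else if xs.contains "excitement" || xs.contains "freedom" then 4
  else 5

lemma pvRk_eq (e : String) : pvRk e =
    if e = "joy" then 0 else if e = "excitement" then 0 else if e = "love" then 0
    else if e = "peace" then 1 else if e = "calm" then 1
    else if e = "sadness" then 2 else if e = "nostalgia" then 2
    else if e = "fear" then 3 else if e = "anxiety" then 3
    else if e = "freedom" then 4
    else if e = "wonder" then 5 else if e = "curiosity" then 5 else 5 := by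
  simp only [pvRk, pvRank, PySem.Dict.ofList, PySem.Dict.update, List.foldl_cons, List.foldl_nil,
    PySem.Dict.getD_insert, PySem.Dict.getD_empty]
  split_ifs <;> simp_all

lemma pvIdx_bound (xs : List String) : 0 ≤ pvIdx xs ∧ pvIdx xs ≤ 5 := by
  unfold pvIdx; split_ifs <;> norm_num

lemma pvRk_bound (e : String) : 0 ≤ pvRk e ∧ pvRk e ≤ 5 := by
  rw [pvRk_eq]; split_ifs <;> norm_num

lemma pvIdx_cons (x : String) (t : List String) :
    pvIdx (x :: t) = min (pvRk x) (pvIdx t) := by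
  have hb := pvIdx_bound t
  by_cases h1 : x = "joy"
  · subst h1
    simp [pvRk_eq, pvIdx, List.contains_cons]
    split_ifs <;> omega
  by_cases h2 : x = "excitement"
  · subst h2
    simp [pvRk_eq, pvIdx, List.contains_cons]
    split_ifs <;> omega
  by_cases h3 : x = "love"
  · subst h3
    simp [pvRk_eq, pvIdx, List.contains_cons]
    split_ifs <;> omega
  by_cases h4 : x = "peace"
  · subst h4
    simp [pvRk_eq, pvIdx, List.contains_cons]
    split_ifs <;> omega
  by_cases h5 : x = "calm"
  · subst h5
    simp [pvRk_eq, pvIdx, List.contains_cons]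
    split_ifs <;> omega
  by_cases h6 : x = "sadness"
  · subst h6
    simp [pvRk_eq, pvIdx, List.contains_cons]
    split_ifs <;> omega
  by_cases h7 : x = "nostalgia"
  · subst h7
    simp [pvRk_eq, pvIdx, List.contains_cons]
    split_ifs <;> omega
  by_cases h8 : x = "fear"
  · subst h8
    simp [pvRk_eq, pvIdx, List.contains_cons]
    split_ifs <;> omega
  by_cases h9 : x = "anxiety"
  · subst h9
    simp [pvRk_eq, pvIdx, List.contains_cons]
    split_ifs <;> omega
  by_cases h10 : x = "freedom"
  · subst h10
    simp [pvRk_eq, pvIdx, List.contains_cons]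
    split_ifs <;> omega
  by_cases h11 : x = "wonder"
  · subst h11
    simp [pvRk_eq, pvIdx, List.contains_cons]
    split_ifs <;> omega
  by_cases h12 : x = "curiosity"
  · subst h12
    simp [pvRk_eq, pvIdx, List.contains_cons]
    split_ifs <;> omega
  have hx5 : pvRk x = 5 := by
    rw [pvRk_eq]; split_ifs <;> simp_all
  simp [pvIdx, List.contains_cons, hx5, h1, h2, h3, h4, h5, h6, h7, h8, h9, h10, h11, h12]
  split_ifs <;> first | omega | tauto

lemma pvChain_eq_pvIdx (xs : List String) : pvChain xs = pvIdx xs := by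
  induction xs with
  | nil => decide
  | cons x t ih => rw [pvChain, ih, pvIdx_cons, min_comm]

lemma pvALoop_eq (xs : List String) :
    pvALoop xs pvMoodTable = PySem.List.pyGetD pvMoods (pvChain xs) "" := by
  rw [pvChain_eq_pvIdx]
  simp only [pvMoodTable, pvALoop, List.any_cons, List.any_nil, pvIdx, Bool.or_eq_true,
    Bool.or_false]
  split_ifs <;> first | rfl | tauto

lemma pvFoldl_min (t : List String) (a : Int) (ha : a ≤ 5) :
    (t.map pvRk).foldl min a = min a (pvChain t) := by
  induction t generalizing a with
  | nil => simp [pvChain]; omega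
  | cons x r ih =>
    have hx := pvRk_bound x
    simp only [List.map_cons, List.foldl_cons, pvChain]
    rw [ih (min a (pvRk x)) (by omega)]
    omega

-- ===== VERDICT (by name: the statement is the Claim_ definition above) =====
theorem determine_overall_mood_py_spec : Claim_equal_determine_overall_mood_py := by
  intro emotions _
  unfold Spec_determine_overall_mood_py determine_overall_mood_py determine_overall_mood_py_alt
  cases emotions with
  | nil => rfl
  | cons x t =>
    simp only [reduceCtorEq, if_false, List.map_cons]
    rw [show ((pvRank.getD x 5) :: t.map (fun e => pvRank.getD e 5))
          = pvRk x :: t.map pvRk from rfl]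
    rw [PySem.List.min?_id_cons]
    have hx := pvRk_bound x
    rw [pvFoldl_min t (pvRk x) (by omega)]
    rw [pvALoop_eq]
    have : pvChain (x :: t) = min (pvRk x) (pvChain t) := rfl
    rw [this]
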